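-- pv_equiv track=rewrite | github.com/JudyAbuquta/CS4074_TrafficBigData | agents/integrated_pipeline.py | rag_retrieve
-- ===== SOURCE A (Python) =====
-- def rag_retrieve(query, documents, top_k=2):
--     query_words = set(query.lower().split())
--     scored = []
--     for doc in documents:
--         text  = doc.get("text", "").lower()
--         score = sum(1 for w in query_words if w in text)
--         if score > 0:
--             scored.append((score, doc))
--     scored.sort(key=lambda x: x[0], reverse=True)
--     return [doc for _, doc in scored[:top_k]]
-- ===== SOURCE B (Python) =====
-- def rag_retrieve(query, documents, top_k=2):
--     query_words = set(query.lower().split())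
--     ranked = [doc
--               for s in range(len(query_words), 0, -1)
--               for doc in documents
--               if sum(1 for w in query_words if w in doc.get("text", "").lower()) == s]
--     return ranked[:top_k]
-- ===== Notes on version B (the rewrite author's own statement) =====
-- stated objective: alternative
-- what changed: Replaces collect-pairs-then-comparison-sort with staged passes: for each possible score from highest to lowest, one pass over the documents collects the documents with exactly that score, so no (score, doc) pairs and no sort are ever built; stability within a score is document order by construction.
import Mathlib
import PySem

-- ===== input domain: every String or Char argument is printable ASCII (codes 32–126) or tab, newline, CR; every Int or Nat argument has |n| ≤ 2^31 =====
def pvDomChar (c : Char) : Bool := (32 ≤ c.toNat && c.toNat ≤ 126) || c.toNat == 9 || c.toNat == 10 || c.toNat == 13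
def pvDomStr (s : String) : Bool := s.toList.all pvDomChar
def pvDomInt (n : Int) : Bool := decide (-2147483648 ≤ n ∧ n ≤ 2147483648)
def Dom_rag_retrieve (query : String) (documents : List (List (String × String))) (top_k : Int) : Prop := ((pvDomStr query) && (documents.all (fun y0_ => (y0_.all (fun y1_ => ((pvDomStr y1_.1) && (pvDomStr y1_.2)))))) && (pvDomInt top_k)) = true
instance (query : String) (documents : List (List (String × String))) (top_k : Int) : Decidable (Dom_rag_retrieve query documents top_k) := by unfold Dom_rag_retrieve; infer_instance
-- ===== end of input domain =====

-- B replaces A's collect-then-sort by staged passes: for each score from highest down,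
-- one pass collects the documents with that score; alternative decomposition, equal results proved.


-- ===== PORT A =====
def rag_retrieve (query : String) (documents : List (List (String × String))) (top_k : Int) : List (List (String × String)) :=
  let query_words := PySem.Set.ofList (PySem.Str.split₀ (PySem.Str.lower query))
  let scored := documents.foldl (fun scored doc =>
      let text := PySem.Str.lower (PySem.Dict.getD (PySem.Dict.mk doc) "text" "")
      let score : Int := ((query_words.filter (fun w => PySem.Str.isIn w text)).length : Int)
      if score > 0 then scored ++ [(score, doc)] else scored)
    ([] : List (Int × List (String × String)))
  let sortedScored := PySem.List.sorted scored (fun x => x.1) true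
  (PySem.List.slice sortedScored none (some top_k)).map (fun x => x.2)

-- ===== PORT B =====
def rag_retrieve_alt (query : String) (documents : List (List (String × String))) (top_k : Int) : List (List (String × String)) :=
  let query_words := PySem.Set.ofList (PySem.Str.split₀ (PySem.Str.lower query))
  let ranked := (PySem.List.pyRange (query_words.length : Int) 0 (-1)).flatMap (fun s =>
      documents.filter (fun doc =>
        ((query_words.filter (fun w =>
            PySem.Str.isIn w (PySem.Str.lower (PySem.Dict.getD (PySem.Dict.mk doc) "text" "")))).length : Int) == s))
  PySem.List.slice ranked none (some top_k)

-- ===== PRECONDITION & SPEC =====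
def Spec_rag_retrieve (query : String) (documents : List (List (String × String))) (top_k : Int) (out : List (List (String × String))) : Prop := out = rag_retrieve_alt query documents top_k
instance (query : String) (documents : List (List (String × String))) (top_k : Int) (out : List (List (String × String))) : Decidable (Spec_rag_retrieve query documents top_k out) := by unfold Spec_rag_retrieve; infer_instance

-- ===== CLAIM (what is proved, stated in full; the proofs are below) =====
def Claim_equal_rag_retrieve : Prop := ∀ (query : String) (documents : List (List (String × String))) (top_k : Int), Dom_rag_retrieve query documents top_k → Spec_rag_retrieve query documents top_k (rag_retrieve query documents top_k)

-- ===== LEMMAS AND PROOFS =====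

-- the score both programs assign to a document
abbrev pvScore (query : String) (doc : List (String × String)) : Nat :=
  ((PySem.Set.ofList (PySem.Str.split₀ (PySem.Str.lower query))).filter
    (fun w => PySem.Str.isIn w (PySem.Str.lower (PySem.Dict.getD (PySem.Dict.mk doc) "text" "")))).length

-- descending list of positive scores [K, K-1, …, 1] (as Ints)
def pvDesc : Nat → List Int
  | 0 => []
  | K + 1 => ((K : Int) + 1) :: pvDesc K

-- the common normal form: docs grouped by score, highest score first, stable within a score
def pvBucketed (query : String) (documents : List (List (String × String))) : List (List (String × String)) :=
  (pvDesc ((PySem.Set.ofList (PySem.Str.split₀ (PySem.Str.lower query))).length)).flatMap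
    (fun s => documents.filter (fun d => (pvScore query d : Int) == s))

theorem pvDesc_succ (K : Nat) : pvDesc (K + 1) = ((K : Int) + 1) :: pvDesc K := rfl

theorem mem_pvDesc {K : Nat} {s : Int} (h : s ∈ pvDesc K) : 1 ≤ s ∧ s ≤ (K : Int) := by
  induction K with
  | zero => simp [pvDesc] at h
  | succ K ih =>
    simp only [pvDesc, List.mem_cons] at h
    rcases h with rfl | h
    · constructor <;> push_cast <;> omega
    · have := ih h; constructor <;> [omega; (push_cast; omega)]

theorem insertBy_skip {α : Type} (before : α → α → Bool) (x : α) (P Q : List α)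
    (h : ∀ y ∈ P, before x y = false) :
    PySem.List.insertBy before x (P ++ Q) = P ++ PySem.List.insertBy before x Q := by
  induction P with
  | nil => simp
  | cons p P ih =>
    have hp : before x p = false := h p (by simp)
    simp only [List.cons_append, PySem.List.insertBy, hp]
    simp [ih (fun y hy => h y (by simp [hy]))]

theorem insertBy_front {α : Type} (before : α → α → Bool) (x : α) (Q : List α)
    (h : ∀ y ∈ Q, before x y = true) :
    PySem.List.insertBy before x Q = x :: Q := by
  cases Q with
  | nil => simp [PySem.List.insertBy]
  | cons q Q => simp [PySem.List.insertBy, h q (by simp)]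

-- inserting (stably, descending) one element into the bucket concatenation appends it to its bucket
theorem insertBy_flatMap {D : Type} (K : Nat) (x : Int × D) (xs : List (Int × D))
    (h1 : 1 ≤ x.1) (h2 : x.1 ≤ (K : Int)) :
    PySem.List.insertBy (fun a b => decide (b.1 < a.1)) x
      ((pvDesc K).flatMap (fun s => xs.filter (fun p => p.1 == s)))
    = (pvDesc K).flatMap (fun s => (xs ++ [x]).filter (fun p => p.1 == s)) := by
  induction K with
  | zero => exact absurd h2 (by simpa using h1)
  | succ K ih =>
    rw [pvDesc_succ]
    simp only [List.flatMap_cons]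
    have hmemQ : ∀ y ∈ (pvDesc K).flatMap (fun s => xs.filter (fun p => p.1 == s)),
        1 ≤ y.1 ∧ y.1 ≤ (K : Int) := by
      intro y hy
      simp only [List.mem_flatMap, List.mem_filter] at hy
      obtain ⟨s, hs, _, hys⟩ := hy
      have hsK := mem_pvDesc hs
      have : y.1 = s := by simpa using hys
      omega
    by_cases hx : x.1 = (K : Int) + 1
    · have hP : ∀ y ∈ xs.filter (fun p : Int × D => p.1 == (K : Int) + 1),
          (fun a b : Int × D => decide (b.1 < a.1)) x y = false := by
        intro y hy
        have : y.1 = (K : Int) + 1 := by simpa using (List.mem_filter.mp hy).2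
        simp only [decide_eq_false_iff_not]; omega
      rw [insertBy_skip _ _ _ _ hP]
      rw [insertBy_front _ _ _ (by
        intro y hy
        have := hmemQ y hy
        simp only [decide_eq_true_eq]; omega)]
      have hflat : (pvDesc K).flatMap (fun s => (xs ++ [x]).filter (fun p => p.1 == s))
          = (pvDesc K).flatMap (fun s => xs.filter (fun p => p.1 == s)) := by
        apply List.flatMap_congr
        intro s hs
        have hsK := mem_pvDesc hs
        rw [List.filter_append]
        have : List.filter (fun p : Int × D => p.1 == s) [x] = [] := by
          simp only [List.filter_cons, List.filter_nil]
          have : ¬ (x.1 = s) := by omega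
          simp [this]
        rw [this, List.append_nil]
      rw [hflat, List.filter_append]
      have hfx : List.filter (fun p : Int × D => p.1 == (K : Int) + 1) [x] = [x] := by simp [hx]
      rw [hfx]
      simp
    · have hx' : x.1 ≤ (K : Int) := by omega
      have hP : ∀ y ∈ xs.filter (fun p : Int × D => p.1 == (K : Int) + 1),
          (fun a b : Int × D => decide (b.1 < a.1)) x y = false := by
        intro y hy
        have : y.1 = (K : Int) + 1 := by simpa using (List.mem_filter.mp hy).2
        simp only [decide_eq_false_iff_not]; omega
      rw [insertBy_skip _ _ _ _ hP, ih hx']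
      have hfx : List.filter (fun p : Int × D => p.1 == (K : Int) + 1) [x] = [] := by
        simp only [List.filter_cons, List.filter_nil]
        simp [hx]
      rw [List.filter_append, hfx, List.append_nil]

-- the stable descending sort by score IS the bucket concatenation
theorem sorted_eq_flatMap_buckets {D : Type} (K : Nat) (xs : List (Int × D))
    (h : ∀ p ∈ xs, 1 ≤ p.1 ∧ p.1 ≤ (K : Int)) :
    PySem.List.sorted xs (fun x => x.1) true
      = (pvDesc K).flatMap (fun s => xs.filter (fun p => p.1 == s)) := by
  rw [PySem.List.sorted_rev_eq_foldl_insertBy]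
  induction xs using List.reverseRecOn with
  | nil => simp
  | append_singleton xs x ih =>
    rw [List.foldl_append, List.foldl_cons, List.foldl_nil]
    rw [ih (fun p hp => h p (by simp [hp]))]
    exact insertBy_flatMap K x xs (h x (by simp)).1 (h x (by simp)).2

-- map commutes with a Python slice
theorem map_slice {α β : Type} (f : α → β) (xs : List α) (a b : Option Int) :
    (PySem.List.slice xs a b).map f = PySem.List.slice (xs.map f) a b := by
  simp [PySem.List.slice, List.map_drop, List.map_take]

-- one bucket of A's scored-filtered-mapped list, projected back to documents
set_option maxHeartbeats 1600000 in
theorem pvA_filter (query : String) (s : Int) (hs1 : 1 ≤ s) (documents : List (List (String × String))) :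
    (List.filter (fun p => p.1 == s)
        (List.map (fun d => ((pvScore query d : Int), d))
          (List.filter (fun d => decide ((pvScore query d : Int) > 0)) documents))).map (fun x => x.2)
    = documents.filter (fun d => (pvScore query d : Int) == s) := by
  induction documents with
  | nil => simp
  | cons d l ih =>
    by_cases hd : (pvScore query d : Int) = s
    · have h0 : decide ((pvScore query d : Int) > 0) = true := decide_eq_true (by omega)
      have hb : ((pvScore query d : Int) == s) = true := beq_iff_eq.mpr hd
      simp only [List.filter_cons, List.map_cons, h0, hb, reduceIte, ih]
    · have hb : ((pvScore query d : Int) == s) = false := beq_eq_false_iff_ne.mpr hd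
      by_cases h0 : (pvScore query d : Int) > 0
      · have h0' : decide ((pvScore query d : Int) > 0) = true := decide_eq_true h0
        simp only [List.filter_cons, List.map_cons, h0', hb, reduceIte, Bool.false_eq_true, if_false, ih]
      · have h0' : decide ((pvScore query d : Int) > 0) = false := decide_eq_false h0
        simp only [List.filter_cons, h0', hb, Bool.false_eq_true, if_false, ih]

-- A computes the bucket concatenation, sliced
set_option maxHeartbeats 1600000 in
theorem rag_retrieve_eq_bucketed (query : String) (documents : List (List (String × String))) (top_k : Int) :
    rag_retrieve query documents top_k
      = PySem.List.slice (pvBucketed query documents) none (some top_k) := by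
  unfold rag_retrieve
  dsimp only
  rw [PySem.List.foldl_append_ite
    (p := fun doc => (pvScore query doc : Int) > 0)
    (f := fun doc => ((pvScore query doc : Int), doc))]
  rw [List.nil_append]
  rw [sorted_eq_flatMap_buckets ((PySem.Set.ofList (PySem.Str.split₀ (PySem.Str.lower query))).length)]
  · rw [map_slice]
    congr 1
    rw [List.map_flatMap]
    unfold pvBucketed
    apply List.flatMap_congr
    intro s hs
    exact pvA_filter query s (mem_pvDesc hs).1 documents
  · intro p hp
    simp only [List.mem_map, List.mem_filter, decide_eq_true_eq] at hp
    obtain ⟨d, ⟨hd, hpos⟩, rfl⟩ := hp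
    refine ⟨by omega, ?_⟩
    simp only [pvScore]
    exact_mod_cast List.length_filter_le _ _

-- the descending Python range over scores IS pvDesc
theorem pyRange_desc (K : Nat) : PySem.List.pyRange (K : Int) 0 (-1) = pvDesc K := by
  induction K with
  | zero => simp [PySem.List.pyRange_neg_one_eq_nil, pvDesc]
  | succ K ih =>
    rw [PySem.List.pyRange_neg_one_cons (by push_cast; omega), pvDesc_succ, ← ih]
    congr 1 <;> push_cast <;> ring_nf

-- B computes the bucket concatenation, sliced
theorem rag_retrieve_alt_eq_bucketed (query : String) (documents : List (List (String × String))) (top_k : Int) :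
    rag_retrieve_alt query documents top_k
      = PySem.List.slice (pvBucketed query documents) none (some top_k) := by
  unfold rag_retrieve_alt
  dsimp only
  rw [pyRange_desc]
  rfl

-- ===== VERDICT (by name: the statement is the Claim_ definition above) =====
theorem rag_retrieve_spec : Claim_equal_rag_retrieve := by
  intro query documents top_k _
  unfold Spec_rag_retrieve
  rw [rag_retrieve_eq_bucketed, rag_retrieve_alt_eq_bucketed]
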